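-- pv_equiv track=rewrite | github.com/MarAlons0/bird_tracker | app/routes/main.py | get_bird_category
-- ===== SOURCE A (Python) =====
-- def get_bird_category(bird_name):
--     """Helper function to categorize birds for marker colors."""
--     bird_name_lower = bird_name.lower()
--
--     # Waterbirds
--     waterbirds = [
--         'duck', 'goose', 'swan', 'loon', 'grebe', 'heron', 'egret', 'crane', 'pelican',
--         'cormorant', 'rail', 'kingfisher', 'gull', 'tern', 'shorebird', 'sandpiper',
--         'plover', 'snipe', 'killdeer', 'phalarope', 'stilt', 'avocet', 'coot', 'gallinule'
--     ]
--
--     # Raptors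
--     raptors = [
--         'hawk', 'eagle', 'falcon', 'owl', 'vulture', 'kite', 'harrier', 'osprey'
--     ]
--
--     # Ground Birds
--     ground_birds = [
--         'quail', 'grouse', 'turkey', 'dove', 'pigeon', 'roadrunner', 'woodcock'
--     ]
--
--     # Aerial Specialists
--     aerial_specialists = [
--         'hummingbird', 'swift', 'swallow', 'nighthawk', 'flycatcher', 'phoebe', 'pewee'
--     ]
--
--     # Tree Specialists
--     tree_specialists = [
--         'woodpecker', 'sapsucker', 'flicker', 'nuthatch', 'creeper'
--     ]
--
--     # Check each category
--     if any(term in bird_name_lower for term in waterbirds):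
--         return 'waterbird'
--     elif any(term in bird_name_lower for term in raptors):
--         return 'raptor'
--     elif any(term in bird_name_lower for term in ground_birds):
--         return 'ground_bird'
--     elif any(term in bird_name_lower for term in aerial_specialists):
--         return 'aerial_specialist'
--     elif any(term in bird_name_lower for term in tree_specialists):
--         return 'tree_specialist'
--     else:
--         return 'songbird'  # Default category for Passeriformes
-- ===== SOURCE B (Python) =====
-- CATEGORY_NAMES = ['waterbird', 'raptor', 'ground_bird', 'aerial_specialist', 'tree_specialist']
--
-- # Flat hash index: keyword -> index of its category in CATEGORY_NAMES (precedence order).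
-- KEYWORD_RANK = {
--     'duck': 0, 'goose': 0, 'swan': 0, 'loon': 0, 'grebe': 0, 'heron': 0, 'egret': 0,
--     'crane': 0, 'pelican': 0, 'cormorant': 0, 'rail': 0, 'kingfisher': 0, 'gull': 0,
--     'tern': 0, 'shorebird': 0, 'sandpiper': 0, 'plover': 0, 'snipe': 0, 'killdeer': 0,
--     'phalarope': 0, 'stilt': 0, 'avocet': 0, 'coot': 0, 'gallinule': 0,
--     'hawk': 1, 'eagle': 1, 'falcon': 1, 'owl': 1, 'vulture': 1, 'kite': 1, 'harrier': 1,
--     'osprey': 1,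
--     'quail': 2, 'grouse': 2, 'turkey': 2, 'dove': 2, 'pigeon': 2, 'roadrunner': 2,
--     'woodcock': 2,
--     'hummingbird': 3, 'swift': 3, 'swallow': 3, 'nighthawk': 3, 'flycatcher': 3,
--     'phoebe': 3, 'pewee': 3,
--     'woodpecker': 4, 'sapsucker': 4, 'flicker': 4, 'nuthatch': 4, 'creeper': 4,
-- }
--
-- # The distinct keyword lengths, ascending (3..11; no keyword has another length).
-- LENGTHS = [3, 4, 5, 6, 7, 8, 9, 10, 11]
--
--
-- def get_bird_category(bird_name):
--     """Hash-indexed window scan: slide over the lowered name once, look up every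
--     window whose length is a keyword length, and keep the best (lowest-precedence-
--     index) category hit; default is 'songbird'."""
--     name = bird_name.lower()
--     n = len(name)
--     best = len(CATEGORY_NAMES)
--     for i in range(n):
--         for L in LENGTHS:
--             r = KEYWORD_RANK.get(name[i:i + L])
--             if r is not None and r < best:
--                 best = r
--     return CATEGORY_NAMES[best] if best < len(CATEGORY_NAMES) else 'songbird'
-- ===== Notes on version B (the rewrite author's own statement) =====
-- stated objective: alternative
-- what changed: Replaces the per-keyword containment-test chain by a single window scan of the lowered name that hash-looks-up every substring window of each keyword length in one flat keyword-to-category-rank dict and returns the category of the minimal rank hit (default songbird).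
import Mathlib
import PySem

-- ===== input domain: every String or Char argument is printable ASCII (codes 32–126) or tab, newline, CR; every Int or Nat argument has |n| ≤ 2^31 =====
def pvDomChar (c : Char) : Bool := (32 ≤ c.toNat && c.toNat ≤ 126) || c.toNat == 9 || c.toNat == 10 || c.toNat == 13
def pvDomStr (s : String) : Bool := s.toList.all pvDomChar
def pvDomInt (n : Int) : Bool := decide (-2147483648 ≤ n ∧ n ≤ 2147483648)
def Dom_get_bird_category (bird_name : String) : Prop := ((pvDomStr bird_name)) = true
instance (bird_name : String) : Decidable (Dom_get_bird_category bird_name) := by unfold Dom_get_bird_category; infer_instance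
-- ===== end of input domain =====

-- B replaces A's per-keyword containment chain by a hash-indexed window scan of the name (objective: alternative).

-- ===== PORT A =====
def get_bird_category (bird_name : String) : String :=
  let bird_name_lower := PySem.Str.lower bird_name
  let waterbirds : List String := [
    "duck", "goose", "swan", "loon", "grebe", "heron", "egret", "crane", "pelican",
    "cormorant", "rail", "kingfisher", "gull", "tern", "shorebird", "sandpiper",
    "plover", "snipe", "killdeer", "phalarope", "stilt", "avocet", "coot", "gallinule"]
  let raptors : List String := [
    "hawk", "eagle", "falcon", "owl", "vulture", "kite", "harrier", "osprey"]
  let ground_birds : List String := [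
    "quail", "grouse", "turkey", "dove", "pigeon", "roadrunner", "woodcock"]
  let aerial_specialists : List String := [
    "hummingbird", "swift", "swallow", "nighthawk", "flycatcher", "phoebe", "pewee"]
  let tree_specialists : List String := [
    "woodpecker", "sapsucker", "flicker", "nuthatch", "creeper"]
  if waterbirds.any (fun term => PySem.Str.isIn term bird_name_lower) then "waterbird"
  else if raptors.any (fun term => PySem.Str.isIn term bird_name_lower) then "raptor"
  else if ground_birds.any (fun term => PySem.Str.isIn term bird_name_lower) then "ground_bird"
  else if aerial_specialists.any (fun term => PySem.Str.isIn term bird_name_lower) then "aerial_specialist"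
  else if tree_specialists.any (fun term => PySem.Str.isIn term bird_name_lower) then "tree_specialist"
  else "songbird"

-- ===== PORT B =====
def pvCategoryNames : List String :=
  ["waterbird", "raptor", "ground_bird", "aerial_specialist", "tree_specialist"]

def pvKeywordRank : PySem.Dict String Int := PySem.Dict.ofList [
  ("duck", 0), ("goose", 0), ("swan", 0), ("loon", 0), ("grebe", 0), ("heron", 0),
  ("egret", 0), ("crane", 0), ("pelican", 0), ("cormorant", 0), ("rail", 0),
  ("kingfisher", 0), ("gull", 0), ("tern", 0), ("shorebird", 0), ("sandpiper", 0),
  ("plover", 0), ("snipe", 0), ("killdeer", 0), ("phalarope", 0), ("stilt", 0),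
  ("avocet", 0), ("coot", 0), ("gallinule", 0),
  ("hawk", 1), ("eagle", 1), ("falcon", 1), ("owl", 1), ("vulture", 1), ("kite", 1),
  ("harrier", 1), ("osprey", 1),
  ("quail", 2), ("grouse", 2), ("turkey", 2), ("dove", 2), ("pigeon", 2),
  ("roadrunner", 2), ("woodcock", 2),
  ("hummingbird", 3), ("swift", 3), ("swallow", 3), ("nighthawk", 3),
  ("flycatcher", 3), ("phoebe", 3), ("pewee", 3),
  ("woodpecker", 4), ("sapsucker", 4), ("flicker", 4), ("nuthatch", 4), ("creeper", 4)]

def pvLengths : List Int := [3, 4, 5, 6, 7, 8, 9, 10, 11]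

def get_bird_category_alt (bird_name : String) : String :=
  let name := PySem.Str.lower bird_name
  let n : Int := PySem.Str.len name
  let best : Int := (PySem.List.pyRange 0 n 1).foldl (fun best i =>
    pvLengths.foldl (fun best L =>
      match pvKeywordRank.get? (PySem.Str.slice name (some i) (some (i + L))) with
      | some r => if r < best then r else best
      | none => best) best) 5
  if best < 5 then PySem.List.pyGetD pvCategoryNames best "" else "songbird"

-- ===== PRECONDITION & SPEC =====
def Spec_get_bird_category (bird_name : String) (out : String) : Prop := out = get_bird_category_alt bird_name
instance (bird_name : String) (out : String) : Decidable (Spec_get_bird_category bird_name out) := by unfold Spec_get_bird_category; infer_instance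

-- ===== CLAIM (what is proved, stated in full; the proofs are below) =====
def Claim_equal_get_bird_category : Prop := ∀ (bird_name : String), Dom_get_bird_category bird_name → Spec_get_bird_category bird_name (get_bird_category bird_name)

-- ===== LEMMAS AND PROOFS =====

set_option maxRecDepth 40000

-- B's inner loop: folding the "keep the smaller hit" step is folding `min` over the hits.
theorem pv_foldl_step {α : Type} (g : α → Option Int) :
    ∀ (l : List α) (init : Int),
      l.foldl (fun best x => match g x with
        | some r => if r < best then r else best
        | none => best) init
        = (l.filterMap g).foldl min init := by
  intro l
  induction l with
  | nil => intro init; rfl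
  | cons x xs ih =>
    intro init
    simp only [List.foldl_cons, List.filterMap_cons]
    cases h : g x with
    | none => simp only [ih]
    | some r =>
      simp only [List.foldl_cons, ih]
      congr 1
      split_ifs <;> omega

-- B's outer loop fuses to one `min`-fold over the flattened hit list.
theorem pv_foldl_flat {α : Type} (f : α → List Int) :
    ∀ (l : List α) (init : Int),
      l.foldl (fun best x => (f x).foldl min best) init = (l.flatMap f).foldl min init := by
  intro l
  induction l with
  | nil => intro init; rfl
  | cons x xs ih => intro init; simp only [List.foldl_cons, List.flatMap_cons, List.foldl_append, ih]

theorem pv_foldl_min_le_init : ∀ (l : List Int) (init : Int), l.foldl min init ≤ init := by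
  intro l
  induction l with
  | nil => intro init; exact le_rfl
  | cons x xs ih =>
    intro init
    exact le_trans (ih (min init x)) (min_le_left _ _)

theorem pv_foldl_min_le_mem {r : Int} : ∀ (l : List Int) (init : Int), r ∈ l → l.foldl min init ≤ r := by
  intro l
  induction l with
  | nil => intro _ h; cases h
  | cons x xs ih =>
    intro init h
    rcases List.mem_cons.mp h with h | h
    · subst h; exact le_trans (pv_foldl_min_le_init xs _) (min_le_right _ _)
    · exact ih _ h

theorem pv_le_foldl_min {k : Int} : ∀ (l : List Int) (init : Int), k ≤ init → (∀ r ∈ l, k ≤ r) → k ≤ l.foldl min init := by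
  intro l
  induction l with
  | nil => intro _ h _; exact h
  | cons x xs ih =>
    intro init hinit hall
    exact ih _ (le_min hinit (hall x (List.mem_cons_self))) (fun r hr => hall r (List.mem_cons_of_mem _ hr))

-- All the ranks B's scan can hit, as one list.
def pvHits (name : String) : List Int :=
  (PySem.List.pyRange 0 (PySem.Str.len name) 1).flatMap (fun i =>
    pvLengths.filterMap (fun L =>
      pvKeywordRank.get? (PySem.Str.slice name (some i) (some (i + L)))))

-- "some keyword of rank r occurs in name"
def pvMatched (name : String) (r : Int) : Prop :=
  ∃ kw, (kw, r) ∈ pvKeywordRank.items ∧ PySem.Str.isIn kw name = true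

theorem pv_nodup_keys : pvKeywordRank.keys.Nodup := by decide

theorem pv_items_fact : ∀ p ∈ pvKeywordRank.items,
    ((p.1.toList.length : Int) ∈ pvLengths ∧ p.1.toList ≠ [] ∧
      (p.2 = 0 ∨ p.2 = 1 ∨ p.2 = 2 ∨ p.2 = 3 ∨ p.2 = 4)) := by decide

theorem pv_lengths_pos : ∀ L ∈ pvLengths, 0 < L := by decide

theorem pv_string_ext {s t : String} (h : s.toList = t.toList) : s = t := by
  have := congrArg String.ofList h; simpa using this

theorem pv_mem_hits_iff (name : String) (r : Int) : r ∈ pvHits name ↔ pvMatched name r := by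
  constructor
  · intro h
    obtain ⟨i, hi, h⟩ := List.mem_flatMap.mp h
    obtain ⟨L, hL, h⟩ := List.mem_filterMap.mp h
    refine ⟨PySem.Str.slice name (some i) (some (i + L)),
      PySem.Dict.mem_items_of_get?_eq_some _ h, ?_⟩
    rw [PySem.List.mem_pyRange_one] at hi
    have h0L : 0 < L := pv_lengths_pos L hL
    rw [PySem.Str.isIn_iff_infix, PySem.Str.toList_slice, PySem.Chars.slice_eq_listSlice,
      PySem.List.slice_toNat name.toList hi.1 (by omega)]
    exact ((name.toList.drop i.toNat).take_prefix _).isInfix.trans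
      (name.toList.drop_suffix i.toNat).isInfix
  · rintro ⟨kw, hmem, hin⟩
    obtain ⟨hlen, hne, -⟩ := pv_items_fact _ hmem
    have hget : pvKeywordRank.get? kw = some r :=
      PySem.Dict.get?_of_mem_items _ hmem pv_nodup_keys
    rw [PySem.Str.isIn_eq] at hin
    obtain ⟨j, hpre⟩ := (PySem.Chars.exists_prefix_drop_iff_isIn kw.toList name.toList).mpr hin
    have hjlt : j < name.toList.length := by
      by_contra h2
      have hdrop : name.toList.drop j = [] := List.drop_eq_nil_of_le (by omega)
      exact hne (List.eq_nil_of_prefix_nil (hdrop ▸ hpre))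
    refine List.mem_flatMap.mpr ⟨(j : Int), ?_,
      List.mem_filterMap.mpr ⟨(kw.toList.length : Int), hlen, ?_⟩⟩
    · rw [PySem.List.mem_pyRange_one]
      refine ⟨by exact_mod_cast Int.natCast_nonneg j, ?_⟩
      rw [PySem.Str.len_eq]
      exact_mod_cast hjlt
    · have hs : PySem.Str.slice name (some (j : Int)) (some ((j : Int) + (kw.toList.length : Int))) = kw := by
        apply pv_string_ext
        rw [PySem.Str.toList_slice, PySem.Chars.slice_eq_listSlice, PySem.List.slice_natCast_add]
        exact (List.prefix_iff_eq_take.mp hpre).symm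
      rw [hs]
      exact hget

theorem pv_matched_range {name : String} {r : Int} (h : pvMatched name r) :
    r = 0 ∨ r = 1 ∨ r = 2 ∨ r = 3 ∨ r = 4 := by
  obtain ⟨kw, hmem, -⟩ := h
  exact (pv_items_fact _ hmem).2.2

theorem pv_best_of {name : String} {k : Int} (hk : k ≤ 5) (hmem : pvMatched name k)
    (hlow : ∀ j, pvMatched name j → k ≤ j) : (pvHits name).foldl min 5 = k :=
  le_antisymm (pv_foldl_min_le_mem _ _ ((pv_mem_hits_iff name k).mpr hmem))
    (pv_le_foldl_min _ _ hk (fun r hr => hlow r ((pv_mem_hits_iff name r).mp hr)))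

theorem pv_best_none {name : String} (h : ∀ j, ¬ pvMatched name j) :
    (pvHits name).foldl min 5 = 5 :=
  le_antisymm (pv_foldl_min_le_init _ _)
    (pv_le_foldl_min _ _ le_rfl (fun r hr => absurd ((pv_mem_hits_iff name r).mp hr) (h r)))

-- A's `any` test for a category list is 'some keyword of that rank occurs'.
theorem pv_any_iff (name : String) (r : Int) (kws : List String)
    (hf : ∀ kw ∈ kws, (kw, r) ∈ pvKeywordRank.items)
    (hb : ∀ p ∈ pvKeywordRank.items, p.2 = r → p.1 ∈ kws) :
    (kws.any (fun term => PySem.Str.isIn term name) = true) ↔ pvMatched name r := by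
  rw [List.any_eq_true]
  constructor
  · rintro ⟨kw, hkw, hin⟩; exact ⟨kw, hf kw hkw, hin⟩
  · rintro ⟨kw, hmem, hin⟩; exact ⟨kw, hb _ hmem rfl, hin⟩

theorem pv_alt_fold (name : String) :
    (PySem.List.pyRange 0 (PySem.Str.len name) 1).foldl (fun best i =>
      pvLengths.foldl (fun best L =>
        match pvKeywordRank.get? (PySem.Str.slice name (some i) (some (i + L))) with
        | some r => if r < best then r else best
        | none => best) best) 5 = (pvHits name).foldl min 5 := by
  have h1 : ∀ (init i : Int),
      pvLengths.foldl (fun best L =>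
        match pvKeywordRank.get? (PySem.Str.slice name (some i) (some (i + L))) with
        | some r => if r < best then r else best
        | none => best) init
      = (pvLengths.filterMap (fun L =>
          pvKeywordRank.get? (PySem.Str.slice name (some i) (some (i + L))))).foldl min init :=
    fun init i => pv_foldl_step _ pvLengths init
  simp only [h1]
  rw [pv_foldl_flat]
  rfl

theorem pv_eq (bird_name : String) : get_bird_category bird_name = get_bird_category_alt bird_name := by
  unfold get_bird_category get_bird_category_alt
  simp only [pv_alt_fold (PySem.Str.lower bird_name)]
  set name := PySem.Str.lower bird_name with hname
  have hW := pv_any_iff name 0 ["duck", "goose", "swan", "loon", "grebe", "heron", "egret", "crane", "pelican",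
    "cormorant", "rail", "kingfisher", "gull", "tern", "shorebird", "sandpiper",
    "plover", "snipe", "killdeer", "phalarope", "stilt", "avocet", "coot", "gallinule"] (by decide) (by decide)
  have hR := pv_any_iff name 1 ["hawk", "eagle", "falcon", "owl", "vulture", "kite", "harrier", "osprey"] (by decide) (by decide)
  have hG := pv_any_iff name 2 ["quail", "grouse", "turkey", "dove", "pigeon", "roadrunner", "woodcock"] (by decide) (by decide)
  have hA := pv_any_iff name 3 ["hummingbird", "swift", "swallow", "nighthawk", "flycatcher", "phoebe", "pewee"] (by decide) (by decide)
  have hT := pv_any_iff name 4 ["woodpecker", "sapsucker", "flicker", "nuthatch", "creeper"] (by decide) (by decide)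
  by_cases h0 : pvMatched name 0
  · rw [if_pos (hW.mpr h0), pv_best_of (by norm_num) h0
      (fun j hj => by rcases pv_matched_range hj with rfl | rfl | rfl | rfl | rfl <;> norm_num)]
    decide
  · rw [if_neg (fun hc => h0 (hW.mp hc))]
    by_cases h1 : pvMatched name 1
    · rw [if_pos (hR.mpr h1), pv_best_of (by norm_num) h1 (fun j hj => by
        rcases pv_matched_range hj with rfl | rfl | rfl | rfl | rfl
        · exact absurd hj h0
        all_goals norm_num)]
      decide
    · rw [if_neg (fun hc => h1 (hR.mp hc))]
      by_cases h2 : pvMatched name 2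
      · rw [if_pos (hG.mpr h2), pv_best_of (by norm_num) h2 (fun j hj => by
          rcases pv_matched_range hj with rfl | rfl | rfl | rfl | rfl
          · exact absurd hj h0
          · exact absurd hj h1
          all_goals norm_num)]
        decide
      · rw [if_neg (fun hc => h2 (hG.mp hc))]
        by_cases h3 : pvMatched name 3
        · rw [if_pos (hA.mpr h3), pv_best_of (by norm_num) h3 (fun j hj => by
            rcases pv_matched_range hj with rfl | rfl | rfl | rfl | rfl
            · exact absurd hj h0
            · exact absurd hj h1
            · exact absurd hj h2
            all_goals norm_num)]
          decide
        · rw [if_neg (fun hc => h3 (hA.mp hc))]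
          by_cases h4 : pvMatched name 4
          · rw [if_pos (hT.mpr h4), pv_best_of (by norm_num) h4 (fun j hj => by
              rcases pv_matched_range hj with rfl | rfl | rfl | rfl | rfl
              · exact absurd hj h0
              · exact absurd hj h1
              · exact absurd hj h2
              · exact absurd hj h3
              all_goals norm_num)]
            decide
          · rw [if_neg (fun hc => h4 (hT.mp hc)), pv_best_none (fun j hj => by
              rcases pv_matched_range hj with rfl | rfl | rfl | rfl | rfl
              · exact absurd hj h0
              · exact absurd hj h1
              · exact absurd hj h2
              · exact absurd hj h3
              · exact absurd hj h4)]
            decide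

-- ===== VERDICT (by name: the statement is the Claim_ definition above) =====
theorem get_bird_category_spec : Claim_equal_get_bird_category := by
  intro bird_name _
  unfold Spec_get_bird_category
  exact pv_eq bird_name
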